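-- pv_equiv track=rewrite | github.com/eliyanovva/project-protein-fold | RF/Duplicates.py | remove_ligands
-- ===== SOURCE A (Python) =====
-- def remove_ligands(ligand_counts, total_by_lig):
--     """
--     This function returns a list of ligands with unique frequencies.
--
--     Args:
--         ligand_counts (dict): dictionary mapping a (str) ligand to a frequency dictionary
--             ex: ligand_counts[lig][kmer] = (int) freq. of kmer in lig
--         total_by_lig (dict): dictionary mapping a ligand 'lig' to the # of protein-ligand pairs with lig as the ligand
--             Refers to both positive and negative pairs.
--             ex: If a ligand 'lig' binds with protein P1 and does not bind with proteins P2, P3, and P4,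
--             then total_by_lig[lig] = 4
--
--     Returns:
--         unique_ligands: list of ligands that are associated with unique kmer frequencies
--             Let K be a set of kmers. Ligands Li and Lj have unique kmer frequences if, for at least
--             one kmer k in K, k does not have the same frequency in Li and Lj.
--     """
--     unique_seqs = {}
--     #key: kmer frequencies (formatted as string), value: ligand with those frequencies
--     #will only store unique kmer frequencies as keys
--
--     ligands = list(ligand_counts.keys())
--     ligands.sort()
--
--     for lig in ligands:
--         #format the kmer frequencies of lig as a string: freq_str
--         freq_str = ""
--         for kmer in ligand_counts[lig]:
--             freq_str += str(ligand_counts[lig][kmer])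
--
--         #if freq_str is unique, automatically store it in unique_seqs
--         if freq_str not in unique_seqs:
--             unique_seqs[freq_str] = lig
--         #otherwise, compare the 2 ligands with the kmer frequencies of freq_str
--         #the ligand that has more pairs will be used in the final matrix
--         else:
--             old_lig = unique_seqs[freq_str]
--             if total_by_lig[lig] > total_by_lig[old_lig]:
--                 unique_seqs[freq_str] = lig
--
--     unique_ligands = list(unique_seqs.values())
--
--     return unique_ligands
-- ===== SOURCE B (Python) =====
-- def remove_ligands(ligand_counts, total_by_lig):
--     # Group ligands (in sorted order) by their concatenated kmer-frequency signature,
--     # then keep from each group the ligand with the most pairs (first one on ties).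
--     groups = {}
--     for lig in sorted(ligand_counts):
--         sig = "".join(str(freq) for freq in ligand_counts[lig].values())
--         groups.setdefault(sig, []).append(lig)
--
--     unique_ligands = []
--     for group in groups.values():
--         best = group[0]
--         for lig in group[1:]:
--             if total_by_lig[lig] > total_by_lig[best]:
--                 best = lig
--         unique_ligands.append(best)
--     return unique_ligands
-- ===== Notes on version B (the rewrite author's own statement) =====
-- stated objective: alternative
-- what changed: A keeps one running best ligand per signature inside a single dict-updating loop; B first groups the sorted ligands into signature buckets and then reduces each bucket to its best ligand in a separate pass (first-maximum on ties, dict value order preserved).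
import Mathlib
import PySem

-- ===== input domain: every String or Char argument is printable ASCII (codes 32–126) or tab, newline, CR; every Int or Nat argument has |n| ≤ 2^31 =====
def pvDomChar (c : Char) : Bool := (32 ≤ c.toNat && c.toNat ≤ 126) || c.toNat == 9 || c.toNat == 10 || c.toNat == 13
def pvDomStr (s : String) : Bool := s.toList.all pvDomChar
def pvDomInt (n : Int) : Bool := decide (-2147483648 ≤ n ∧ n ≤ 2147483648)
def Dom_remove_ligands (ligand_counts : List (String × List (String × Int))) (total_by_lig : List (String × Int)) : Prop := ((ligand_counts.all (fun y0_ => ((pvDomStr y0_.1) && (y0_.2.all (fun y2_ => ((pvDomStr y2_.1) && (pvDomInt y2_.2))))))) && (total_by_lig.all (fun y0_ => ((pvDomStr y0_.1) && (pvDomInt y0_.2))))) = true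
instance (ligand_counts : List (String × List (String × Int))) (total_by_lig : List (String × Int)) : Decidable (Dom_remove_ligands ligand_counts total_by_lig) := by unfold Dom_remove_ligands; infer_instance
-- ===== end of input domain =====

-- B groups the sorted ligands by signature in one dict-of-lists pass and then picks each
-- group's best ligand in a second pass (objective: alternative decomposition, same cost).

-- ===== PORT A =====
def remove_ligands (ligand_counts : List (String × List (String × Int))) (total_by_lig : List (String × Int)) : List String :=
  let lc := PySem.Dict.ofList ligand_counts
  let tbl := PySem.Dict.ofList total_by_lig
  let ligands := PySem.List.sorted lc.keys (fun x => x)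
  let unique_seqs := ligands.foldl (fun (us : PySem.Dict String String) lig =>
    let fd := PySem.Dict.ofList (lc.getD lig [])
    let freq_str := fd.keys.foldl (fun s kmer => s ++ PySem.Int.toStr (fd.getD kmer 0)) ""
    match us.get? freq_str with
    | none => us.insert freq_str lig
    | some old_lig =>
      -- under Pre_ both totals are present; getD's default is never the looked-up value there
      if tbl.getD lig 0 > tbl.getD old_lig 0 then us.insert freq_str lig else us)
    PySem.Dict.empty
  unique_seqs.values

-- ===== PORT B =====
-- the inner loop of Source B's second pass: best ligand of a group ("" unreachable: groups are nonempty)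
def pvBestOf (tbl : PySem.Dict String Int) (group : List String) : String :=
  match group with
  | [] => ""
  | best0 :: rest => rest.foldl (fun best lig => if tbl.getD lig 0 > tbl.getD best 0 then lig else best) best0

def remove_ligands_alt (ligand_counts : List (String × List (String × Int))) (total_by_lig : List (String × Int)) : List String :=
  let lc := PySem.Dict.ofList ligand_counts
  let tbl := PySem.Dict.ofList total_by_lig
  let groups := (PySem.List.sorted lc.keys (fun x => x)).foldl
    (fun (g : PySem.Dict String (List String)) lig =>
      let sig := PySem.Str.join "" (((PySem.Dict.ofList (lc.getD lig [])).values).map PySem.Int.toStr)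
      g.modify sig [] (fun grp => grp ++ [lig]))
    PySem.Dict.empty
  groups.values.map (pvBestOf tbl)

-- ===== PRECONDITION & SPEC =====
-- signature of one ligand's frequency dict, used only to state Pre_
def pvSigOf (fdl : List (String × Int)) : String :=
  PySem.Str.join "" (((PySem.Dict.ofList fdl).values).map PySem.Int.toStr)

-- Pre_ excludes exactly the inputs on which Python A raises KeyError: two distinct ligands
-- share a frequency signature while one of them is missing from total_by_lig.
def Pre_remove_ligands (ligand_counts : List (String × List (String × Int))) (total_by_lig : List (String × Int)) : Prop :=
  ∀ k1 ∈ (PySem.Dict.ofList ligand_counts).keys, ∀ k2 ∈ (PySem.Dict.ofList ligand_counts).keys,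
    k1 ≠ k2 → pvSigOf ((PySem.Dict.ofList ligand_counts).getD k1 []) = pvSigOf ((PySem.Dict.ofList ligand_counts).getD k2 []) →
      (PySem.Dict.ofList total_by_lig).contains k1 = true
instance (ligand_counts : List (String × List (String × Int))) (total_by_lig : List (String × Int)) : Decidable (Pre_remove_ligands ligand_counts total_by_lig) := by unfold Pre_remove_ligands; infer_instance

def pvWitness_remove_ligands : (List (String × List (String × Int))) × (List (String × Int)) :=
  ([("a", [("k", 1)]), ("b", [("k", 1)]), ("c", [("k", 2)])], [("a", 2), ("b", 3)])

def Spec_remove_ligands (ligand_counts : List (String × List (String × Int))) (total_by_lig : List (String × Int)) (out : List String) : Prop := out = remove_ligands_alt ligand_counts total_by_lig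
instance (ligand_counts : List (String × List (String × Int))) (total_by_lig : List (String × Int)) (out : List String) : Decidable (Spec_remove_ligands ligand_counts total_by_lig out) := by unfold Spec_remove_ligands; infer_instance

-- ===== CLAIM (what is proved, stated in full; the proofs are below) =====
def Claim_equal_remove_ligands : Prop := ∀ (ligand_counts : List (String × List (String × Int))) (total_by_lig : List (String × Int)), Dom_remove_ligands ligand_counts total_by_lig → Pre_remove_ligands ligand_counts total_by_lig → Spec_remove_ligands ligand_counts total_by_lig (remove_ligands ligand_counts total_by_lig)

-- ===== LEMMAS AND PROOFS =====

-- "".join over strings is the foldl-append loop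
lemma str_join_empty_cons (x : String) (xs : List String) :
    PySem.Str.join "" (x :: xs) = x ++ PySem.Str.join "" xs := by
  apply String.toList_inj.mp
  cases xs with
  | nil => simp [PySem.Str.join, PySem.Chars.join_singleton, PySem.Chars.join_nil]
  | cons y ys => simp [PySem.Str.join, PySem.Chars.join_cons_cons]

lemma str_foldl_append {α : Type} (f : α → String) (l : List α) (init : String) :
    l.foldl (fun s x => s ++ f x) init = init ++ PySem.Str.join "" (l.map f) := by
  induction l generalizing init with
  | nil => simp [PySem.Str.join, PySem.Chars.join_nil]
  | cons a t ih => simp [List.foldl_cons, ih, str_join_empty_cons, String.append_assoc]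

-- A's key-by-key concatenation equals B's join over the values
lemma sig_eq (fdl : List (String × Int)) :
    (PySem.Dict.ofList fdl).keys.foldl
        (fun s kmer => s ++ PySem.Int.toStr ((PySem.Dict.ofList fdl).getD kmer 0)) ""
      = PySem.Str.join "" (((PySem.Dict.ofList fdl).values).map PySem.Int.toStr) := by
  rw [PySem.Dict.values_eq_map_keys _ (PySem.Dict.nodup_keys_ofList fdl) 0, str_foldl_append,
    List.map_map]
  simp only [Function.comp_def]
  simp

lemma get?_mk_map (f : List String → String) (l : List (String × List String)) (k : String) :
    (PySem.Dict.mk (l.map (fun p => (p.1, f p.2)))).get? k = ((PySem.Dict.mk l).get? k).map f := by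
  induction l with
  | nil => simp [PySem.Dict.get?]
  | cons a t ih =>
    rw [List.map_cons, PySem.Dict.get?_mk_cons, PySem.Dict.get?_mk_cons]
    by_cases h : a.1 == k
    · rw [if_pos h, if_pos h]; rfl
    · rw [if_neg h, if_neg h]; exact ih

lemma pvBestOf_append (tbl : PySem.Dict String Int) (h : String) (t : List String) (lig : String) :
    pvBestOf tbl ((h :: t) ++ [lig])
      = if tbl.getD lig 0 > tbl.getD (pvBestOf tbl (h :: t)) 0 then lig else pvBestOf tbl (h :: t) := by
  simp [pvBestOf, List.foldl_append]

-- the loop invariant: A's dict is the key-preserving image of B's group dict under pvBestOf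
lemma main_inv (tbl : PySem.Dict String Int) (sig : String → String) (ligs : List String)
    (us : PySem.Dict String String) (g : PySem.Dict String (List String))
    (h1 : us.items = g.items.map (fun p => (p.1, pvBestOf tbl p.2)))
    (h2 : g.keys.Nodup)
    (h3 : ∀ p ∈ g.items, p.2 ≠ []) :
    (ligs.foldl (fun (us : PySem.Dict String String) lig =>
        match us.get? (sig lig) with
        | none => us.insert (sig lig) lig
        | some old_lig =>
          if tbl.getD lig 0 > tbl.getD old_lig 0 then us.insert (sig lig) lig else us) us).items
      = (ligs.foldl (fun (g : PySem.Dict String (List String)) lig =>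
          g.modify (sig lig) [] (fun grp => grp ++ [lig])) g).items.map
            (fun p => (p.1, pvBestOf tbl p.2)) := by
  induction ligs generalizing us g with
  | nil => exact h1
  | cons lig rest ih =>
    have hrel : ∀ k, us.get? k = (g.get? k).map (pvBestOf tbl) := by
      intro k
      have hus : us = PySem.Dict.mk (g.items.map (fun p => (p.1, pvBestOf tbl p.2))) := by
        cases us with | mk i => cases g with | mk j => simpa using h1
      rw [hus, get?_mk_map]
    simp only [List.foldl_cons, PySem.Dict.modify]
    cases hg : g.get? (sig lig) with
    | none =>
      have hu : us.get? (sig lig) = none := by rw [hrel, hg]; rfl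
      have hcu : us.contains (sig lig) = false := by
        rw [PySem.Dict.contains_eq_isSome_get?, hu]; rfl
      have hcg : g.contains (sig lig) = false := by
        rw [PySem.Dict.contains_eq_isSome_get?, hg]; rfl
      rw [hu]
      apply ih
      · rw [PySem.Dict.items_insert_of_not_contains _ _ hcu,
            PySem.Dict.items_insert_of_not_contains _ _ hcg,
            PySem.Dict.getD_of_get?_eq_none _ _ hg]
        simp [h1, pvBestOf]
      · exact PySem.Dict.nodup_keys_insert _ _ _ h2
      · intro p hp
        rcases (PySem.Dict.mem_items_insert _ _ _ _).mp hp with h | ⟨hmem, _⟩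
        · subst h; simp [PySem.Dict.getD_of_get?_eq_none _ _ hg]
        · exact h3 p hmem
    | some grp =>
      have hu : us.get? (sig lig) = some (pvBestOf tbl grp) := by rw [hrel, hg]; rfl
      have hcu : us.contains (sig lig) = true := by
        rw [PySem.Dict.contains_eq_isSome_get?, hu]; rfl
      have hcg : g.contains (sig lig) = true := by
        rw [PySem.Dict.contains_eq_isSome_get?, hg]; rfl
      have hgd : g.getD (sig lig) [] = grp := PySem.Dict.getD_of_get?_eq_some _ _ hg
      have hmemg : (sig lig, grp) ∈ g.items := PySem.Dict.mem_items_of_get?_eq_some _ hg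
      have hne : grp ≠ [] := h3 _ hmemg
      obtain ⟨gh, gt, rfl⟩ : ∃ a b, grp = a :: b := by
        cases grp with
        | nil => exact absurd rfl hne
        | cons a b => exact ⟨a, b, rfl⟩
      rw [hu, hgd]
      have hbest := pvBestOf_append tbl gh gt lig
      have hstep : (match some (pvBestOf tbl (gh :: gt)) with
          | none => us.insert (sig lig) lig
          | some old_lig =>
            if tbl.getD lig 0 > tbl.getD old_lig 0 then us.insert (sig lig) lig else us)
          = (if tbl.getD lig 0 > tbl.getD (pvBestOf tbl (gh :: gt)) 0 then us.insert (sig lig) lig else us) := rfl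
      rw [hstep]
      have hnodup' := PySem.Dict.nodup_keys_insert g (sig lig) ((gh :: gt) ++ [lig]) h2
      have h3' : ∀ p ∈ (g.insert (sig lig) ((gh :: gt) ++ [lig])).items, p.2 ≠ [] := by
        intro p hp
        rcases (PySem.Dict.mem_items_insert _ _ _ _).mp hp with h | ⟨hmem, _⟩
        · subst h; simp
        · exact h3 p hmem
      split_ifs with hc
      · apply ih _ _ _ hnodup' h3'
        rw [PySem.Dict.items_insert_of_contains _ _ hcu,
            PySem.Dict.items_insert_of_contains _ _ hcg, h1,
            List.map_map, List.map_map]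
        apply List.map_congr_left
        intro p hp
        by_cases hps : p.1 == sig lig
        · simp only [Function.comp, hps, if_pos]
          simp only [Prod.mk.injEq, true_and]
          rw [hbest, if_pos hc]
        · simp only [Function.comp]
          simp [hps]
      · apply ih _ _ _ hnodup' h3'
        rw [PySem.Dict.items_insert_of_contains _ _ hcg, h1, List.map_map]
        apply List.map_congr_left
        intro p hp
        by_cases hps : p.1 == sig lig
        · have hkey : p.1 = sig lig := by exact beq_iff_eq.mp hps
          have hval : g.get? p.1 = some p.2 := PySem.Dict.get?_of_mem_items _ (by exact hp) h2
          rw [hkey, hg] at hval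
          have hp2 : p.2 = gh :: gt := (Option.some.inj hval).symm
          have hpe : p = (sig lig, gh :: gt) := Prod.ext hkey hp2
          subst hpe
          simp only [Function.comp, hps, if_pos]
          simp only [Prod.mk.injEq, true_and]
          rw [hbest, if_neg hc]
        · simp only [Function.comp]
          simp [hps]

-- ===== VERDICT (by name: the statement is the Claim_ definition above) =====
theorem remove_ligands_spec : Claim_equal_remove_ligands := by
  intro ligand_counts total_by_lig _ _
  unfold Spec_remove_ligands remove_ligands remove_ligands_alt
  simp only [sig_eq]
  rw [show ∀ (d : PySem.Dict String String), d.values = d.items.map (fun p => p.2) from fun _ => rfl,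
      show ∀ (d : PySem.Dict String (List String)), d.values = d.items.map (fun p => p.2) from
        fun _ => rfl,
      main_inv (PySem.Dict.ofList total_by_lig)
        (fun lig => PySem.Str.join ""
          (((PySem.Dict.ofList ((PySem.Dict.ofList ligand_counts).getD lig [])).values).map
            PySem.Int.toStr))
        _ PySem.Dict.empty PySem.Dict.empty rfl PySem.Dict.nodup_keys_empty
        (by intro p hp; simp [PySem.Dict.empty] at hp)]
  rw [List.map_map, List.map_map]
  rfl
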